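-- pv_equiv track=rewrite | github.com/PanelBox-Econometrics-Model/panelbox | examples/var/utils/data_generators.py | _quarter_labels
-- ===== SOURCE A (Python) =====
-- def _quarter_labels(start_year: int, n_quarters: int) -> list:
--     """Generate a list of quarter labels like '2010-Q1', '2010-Q2', ..."""
--     labels = []
--     y, q = start_year, 1
--     for _ in range(n_quarters):
--         labels.append(f"{y}-Q{q}")
--         q += 1
--         if q > 4:
--             q = 1
--             y += 1
--     return labels
-- ===== SOURCE B (Python) =====
-- def _quarter_labels(start_year: int, n_quarters: int) -> list:
--     """Generate a list of quarter labels like '2010-Q1', '2010-Q2', ..."""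
--     if n_quarters <= 0:
--         return []
--     n_years = -(-n_quarters // 4)  # ceil(n_quarters / 4)
--     labels = []
--     for y in range(start_year, start_year + n_years):
--         labels += [f"{y}-Q1", f"{y}-Q2", f"{y}-Q3", f"{y}-Q4"]
--     return labels[:n_quarters]
-- ===== Notes on version B (the rewrite author's own statement) =====
-- stated objective: alternative
-- what changed: B generates whole-year blocks of four fixed-suffix labels (y-Q1..y-Q4) for ceil(n/4) years and then truncates the list to n_quarters with a slice, instead of A's single per-quarter loop with a rolling (y, q) counter and rollover branch.
import Mathlib
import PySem

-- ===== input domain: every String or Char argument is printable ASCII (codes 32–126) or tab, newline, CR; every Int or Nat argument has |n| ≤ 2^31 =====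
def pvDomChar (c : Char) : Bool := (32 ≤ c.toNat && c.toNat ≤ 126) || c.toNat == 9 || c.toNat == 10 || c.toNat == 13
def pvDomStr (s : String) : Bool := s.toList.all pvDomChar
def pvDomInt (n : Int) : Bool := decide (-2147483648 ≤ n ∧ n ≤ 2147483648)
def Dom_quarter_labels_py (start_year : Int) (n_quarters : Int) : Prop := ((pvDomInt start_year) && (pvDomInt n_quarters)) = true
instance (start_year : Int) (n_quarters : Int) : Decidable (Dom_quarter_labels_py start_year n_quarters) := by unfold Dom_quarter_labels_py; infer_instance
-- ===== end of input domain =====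

-- B generates whole-year blocks of four fixed-suffix labels and truncates to n_quarters,
-- instead of A's per-quarter loop with a rolling (y, q) counter; objective: alternative.


-- ===== PORT A =====
-- the loop body runs n_quarters.toNat times (range(n) with unused index), carrying (labels, y, q)
def quarterLabelsLoopA (fuel : Nat) (y q : Int) (labels : List String) : List String :=
  match fuel with
  | 0 => labels
  | n + 1 =>
    let labels := labels ++ [PySem.Int.toStr y ++ "-Q" ++ PySem.Int.toStr q]
    let q := q + 1
    if q > 4 then quarterLabelsLoopA n (y + 1) 1 labels
    else quarterLabelsLoopA n y q labels

def quarter_labels_py (start_year : Int) (n_quarters : Int) : List String :=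
  quarterLabelsLoopA n_quarters.toNat start_year 1 []

-- ===== PORT B =====
def quarter_labels_py_alt (start_year : Int) (n_quarters : Int) : List String :=
  if n_quarters ≤ 0 then []
  else
    let nYears := -(PySem.Int.floordiv (-n_quarters) 4)
    let labels := (PySem.List.pyRange start_year (start_year + nYears) 1).foldl
      (fun acc y => acc ++ [PySem.Int.toStr y ++ "-Q1", PySem.Int.toStr y ++ "-Q2",
                            PySem.Int.toStr y ++ "-Q3", PySem.Int.toStr y ++ "-Q4"]) []
    PySem.List.slice labels none (some n_quarters)

-- ===== PRECONDITION & SPEC =====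
def Spec_quarter_labels_py (start_year : Int) (n_quarters : Int) (out : List String) : Prop := out = quarter_labels_py_alt start_year n_quarters
instance (start_year : Int) (n_quarters : Int) (out : List String) : Decidable (Spec_quarter_labels_py start_year n_quarters out) := by unfold Spec_quarter_labels_py; infer_instance

-- ===== CLAIM =====
def Claim_equal_quarter_labels_py : Prop := ∀ (start_year : Int) (n_quarters : Int), Dom_quarter_labels_py start_year n_quarters → Spec_quarter_labels_py start_year n_quarters (quarter_labels_py start_year n_quarters)

-- ===== LEMMAS AND PROOFS =====

-- the label for global quarter index k (0-based)
def quarterLbl (s : Int) (k : Nat) : String :=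
  PySem.Int.toStr (s + ((k / 4 : Nat) : Int)) ++ "-Q" ++ PySem.Int.toStr (((k % 4 : Nat) : Int) + 1)

-- A's loop from state (year s + k/4, quarter k%4 + 1) emits the labels for indices k, k+1, …
theorem quarterLabelsLoopA_eq (s : Int) (fuel : Nat) :
    ∀ (k : Nat) (acc : List String),
      quarterLabelsLoopA fuel (s + ((k / 4 : Nat) : Int)) (((k % 4 : Nat) : Int) + 1) acc
        = acc ++ (List.range fuel).map (fun j => quarterLbl s (k + j)) := by
  induction fuel with
  | zero => intro k acc; simp [quarterLabelsLoopA]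
  | succ n ih =>
    intro k acc
    rw [List.range_succ_eq_map]
    simp only [quarterLabelsLoopA, List.map_cons, List.map_map]
    have hcomp : ((fun j => quarterLbl s (k + j)) ∘ Nat.succ)
        = fun j => quarterLbl s (k + 1 + j) := by
      funext j
      simp only [Function.comp]
      congr 1
      omega
    split_ifs with h
    · have h4 : (k + 1) / 4 = k / 4 + 1 := by omega
      have h4' : (k + 1) % 4 = 0 := by omega
      have hrec := ih (k + 1) (acc ++ [PySem.Int.toStr (s + ((k / 4 : Nat) : Int)) ++ "-Q"
          ++ PySem.Int.toStr (((k % 4 : Nat) : Int) + 1)])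
      rw [h4, h4'] at hrec
      simp only [Nat.cast_add, Nat.cast_one, Nat.cast_zero, zero_add, ← add_assoc] at hrec
      rw [hrec, hcomp]
      simp [quarterLbl]
    · have h4 : (k + 1) / 4 = k / 4 := by
        have : k % 4 < 3 := by omega
        omega
      have h4' : (k + 1) % 4 = k % 4 + 1 := by
        have : k % 4 < 3 := by omega
        omega
      have hrec := ih (k + 1) (acc ++ [PySem.Int.toStr (s + ((k / 4 : Nat) : Int)) ++ "-Q"
          ++ PySem.Int.toStr (((k % 4 : Nat) : Int) + 1)])
      rw [h4, h4'] at hrec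
      simp only [Nat.cast_add, Nat.cast_one] at hrec
      rw [hrec, hcomp]
      simp [quarterLbl]

-- B's year blocks, flattened over m years, are exactly the per-quarter labels 0 … 4m-1
theorem blocks_eq_map (s : Int) (m : Nat) :
    (List.range m).flatMap (fun (j : Nat) => [PySem.Int.toStr (s + (j : Int)) ++ "-Q1",
        PySem.Int.toStr (s + (j : Int)) ++ "-Q2", PySem.Int.toStr (s + (j : Int)) ++ "-Q3",
        PySem.Int.toStr (s + (j : Int)) ++ "-Q4"])
      = (List.range (4 * m)).map (quarterLbl s) := by
  induction m with
  | zero => simp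
  | succ m ih =>
    rw [List.range_succ, List.flatMap_append, ih]
    have h4 : 4 * (m + 1) = 4 * m + 4 := by ring
    rw [h4, List.range_add, List.map_append, List.map_map]
    congr 1
    have hrange : List.range 4 = [0, 1, 2, 3] := by decide
    rw [hrange]
    simp only [List.flatMap_cons, List.flatMap_nil, List.map_cons, List.map_nil,
      Function.comp, quarterLbl, List.append_nil]
    have d0 : (4 * m + 0) / 4 = m ∧ (4 * m + 0) % 4 = 0 := by omega
    have d1 : (4 * m + 1) / 4 = m ∧ (4 * m + 1) % 4 = 1 := by omega
    have d2 : (4 * m + 2) / 4 = m ∧ (4 * m + 2) % 4 = 2 := by omega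
    have d3 : (4 * m + 3) / 4 = m ∧ (4 * m + 3) % 4 = 3 := by omega
    rw [d0.1, d0.2, d1.1, d1.2, d2.1, d2.2, d3.1, d3.2]
    have hq : ∀ (q1 : String) (y : Int), PySem.Int.toStr y ++ "-Q" ++ q1
        = PySem.Int.toStr y ++ ("-Q" ++ q1) := by
      intro q1 y; rw [String.append_assoc]
    have e1 : "-Q" ++ PySem.Int.toStr 1 = "-Q1" := by decide
    have e2 : "-Q" ++ PySem.Int.toStr 2 = "-Q2" := by decide
    have e3 : "-Q" ++ PySem.Int.toStr 3 = "-Q3" := by decide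
    have e4 : "-Q" ++ PySem.Int.toStr 4 = "-Q4" := by decide
    norm_num [hq, e1, e2, e3, e4]

-- ===== VERDICT =====
theorem quarter_labels_py_spec : Claim_equal_quarter_labels_py := by
  intro s n _
  unfold Spec_quarter_labels_py quarter_labels_py quarter_labels_py_alt
  by_cases hn : n ≤ 0
  · have h0 : n.toNat = 0 := by omega
    simp [hn, h0, quarterLabelsLoopA]
  · rw [not_le] at hn
    simp only [if_neg (by omega : ¬ n ≤ 0)]
    have hA := quarterLabelsLoopA_eq s n.toNat 0 []
    simp only [Nat.zero_div, Nat.zero_mod, Nat.cast_zero, zero_add, add_zero,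
      List.nil_append] at hA
    rw [hA]
    have hfd : PySem.Int.floordiv (-n) 4 = (-n) / 4 :=
      PySem.Int.floordiv_eq_ediv_of_pos (by omega)
    set ny := -(PySem.Int.floordiv (-n) 4) with hny
    have hnb : n ≤ 4 * ny ∧ 4 * ny < n + 4 ∧ 0 < ny := by rw [hny, hfd]; omega
    rw [PySem.List.foldl_append_eq_flatMap, List.nil_append, PySem.List.pyRange_one,
      List.flatMap_map]
    have hd : s + ny - s = ny := by ring
    rw [hd]
    have hblocks := blocks_eq_map s ny.toNat
    rw [hblocks, PySem.List.slice_to _ (by omega : (0:Int) ≤ n), List.map_take.symm,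
      List.take_range]
    have hmin : min n.toNat (4 * ny.toNat) = n.toNat := by omega
    rw [hmin]
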